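-- pv_equiv track=rewrite | github.com/miliar/Code_Jam_Webscraper | solutions_python/Problem_138/1213.py | play_war
-- ===== SOURCE A (Python) =====
-- def play_war(g, b):
--     _g = g[:]
--     _b = b[:]
--     cnt = 0
--     for i in _g:
--         x = [j for j in _b if j > i]
--         if x != []:
--             _b.remove(x[0])
--         else:
--             cnt += 1
--     return cnt
-- ===== SOURCE B (Python) =====
-- # Segment tree (recursive tuples) of max over positions; remove leftmost live value > i.
-- def _tmax(t):
--     return t[1]
--
-- def _omax(a, b):
--     if a is None:
--         return b
--     if b is None:
--         return a
--     return a if a > b else b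
--
-- def _ogt(v, i):
--     return v is not None and v > i
--
-- def _build(xs):
--     if len(xs) == 0:
--         return ('L', None)
--     if len(xs) == 1:
--         return ('L', xs[0])
--     m = len(xs) // 2
--     l = _build(xs[:m])
--     r = _build(xs[m:])
--     return ('N', _omax(_tmax(l), _tmax(r)), l, r)
--
-- def _qr(t, i):
--     # remove the leftmost live leaf with value > i; None if there is none
--     if not _ogt(_tmax(t), i):
--         return None
--     if t[0] == 'L':
--         return ('L', None)
--     l2 = _qr(t[2], i)
--     if l2 is not None:
--         return ('N', _omax(_tmax(l2), _tmax(t[3])), l2, t[3])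
--     r2 = _qr(t[3], i)
--     if r2 is not None:
--         return ('N', _omax(_tmax(t[2]), _tmax(r2)), t[2], r2)
--     return None
--
-- def play_war(g, b):
--     t = _build(b)
--     cnt = 0
--     for i in g:
--         t2 = _qr(t, i)
--         if t2 is None:
--             cnt += 1
--         else:
--             t = t2
--     return cnt
-- ===== Notes on version B (the rewrite author's own statement) =====
-- stated objective: faster
-- what changed: Replaces the per-card linear scan + list.remove over the surviving b-list with a segment tree of maxima over b's positions, deleting the leftmost live value > i in logarithmic time.
import Mathlib
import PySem

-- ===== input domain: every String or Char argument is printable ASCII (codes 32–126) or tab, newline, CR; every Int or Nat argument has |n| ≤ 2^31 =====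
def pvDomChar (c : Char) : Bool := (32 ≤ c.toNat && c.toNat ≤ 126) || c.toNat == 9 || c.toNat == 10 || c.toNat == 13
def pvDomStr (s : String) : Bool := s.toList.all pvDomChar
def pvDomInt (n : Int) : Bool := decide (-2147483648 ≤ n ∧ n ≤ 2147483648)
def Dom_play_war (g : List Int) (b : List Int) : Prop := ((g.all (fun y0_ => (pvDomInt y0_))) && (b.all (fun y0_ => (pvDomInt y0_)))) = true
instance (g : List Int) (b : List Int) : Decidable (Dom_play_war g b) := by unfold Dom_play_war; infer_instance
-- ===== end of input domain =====

-- B replaces A's quadratic scan-and-remove with a segment tree of maxima over b's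
-- positions (delete leftmost live value > i); measured asymptotically faster.

-- ===== PORT A =====
-- A's loop body: x = [j for j in _b if j > i]; if x != []: _b.remove(x[0]) else cnt += 1
-- (the `g[:]`/`b[:]` copies have no effect on the return value and are not modelled)
def stepA (s : List Int × Int) (i : Int) : List Int × Int :=
  match s.1.filter (fun j => decide (j > i)) with
  | [] => (s.1, s.2 + 1)
  | h :: _ => ((PySem.List.remove? s.1 h).getD s.1, s.2)

def play_war (g : List Int) (b : List Int) : Int :=
  (g.foldl stepA (b, 0)).2

-- ===== PORT B =====
-- tagged tuples ('L', v) / ('N', mx, l, r) become this inductive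
inductive STree where
  | leaf : Option Int → STree
  | node : Option Int → STree → STree → STree
deriving DecidableEq, Repr

def tmax : STree → Option Int
  | .leaf v => v
  | .node mx _ _ => mx

-- Python _omax: None-aware `a if a > b else b`
def omax : Option Int → Option Int → Option Int
  | none, b => b
  | some a, none => some a
  | some a, some b => some (if a > b then a else b)

-- Python _ogt: v is not None and v > i
def ogt (v : Option Int) (i : Int) : Bool :=
  match v with
  | none => false
  | some a => decide (a > i)

def buildT : List Int → STree
  | [] => .leaf none
  | [v] => .leaf (some v)
  | a :: c :: rest =>
      let m := (a :: c :: rest).length / 2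
      let l := buildT ((a :: c :: rest).take m)
      let r := buildT ((a :: c :: rest).drop m)
      .node (omax (tmax l) (tmax r)) l r
termination_by xs => xs.length
decreasing_by
  · simp; omega
  · simp; omega

def qr (t : STree) (i : Int) : Option STree :=
  if ogt (tmax t) i then
    match t with
    | .leaf _ => some (.leaf none)
    | .node _ l r =>
      match qr l i with
      | some l2 => some (.node (omax (tmax l2) (tmax r)) l2 r)
      | none =>
        match qr r i with
        | some r2 => some (.node (omax (tmax l) (tmax r2)) l r2)
        | none => none
  else none

def stepB (s : STree × Int) (i : Int) : STree × Int :=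
  match qr s.1 i with
  | none => (s.1, s.2 + 1)
  | some t2 => (t2, s.2)

def play_war_alt (g : List Int) (b : List Int) : Int :=
  (g.foldl stepB (buildT b, 0)).2

-- ===== PRECONDITION & SPEC =====
def Spec_play_war (g : List Int) (b : List Int) (out : Int) : Prop := out = play_war_alt g b
instance (g : List Int) (b : List Int) (out : Int) : Decidable (Spec_play_war g b out) := by unfold Spec_play_war; infer_instance

-- ===== CLAIM (what is proved, stated in full; the proofs are below) =====
def Claim_equal_play_war : Prop := ∀ (g : List Int) (b : List Int), Dom_play_war g b → Spec_play_war g b (play_war g b)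

-- ===== LEMMAS AND PROOFS =====

-- live leaves of a tree, left to right
def alive : STree → List Int
  | .leaf none => []
  | .leaf (some v) => [v]
  | .node _ l r => alive l ++ alive r

def listMax (xs : List Int) : Option Int :=
  xs.foldr (fun v acc => omax (some v) acc) none

def WF : STree → Prop
  | .leaf _ => True
  | .node mx l r => mx = omax (tmax l) (tmax r) ∧ WF l ∧ WF r

lemma omax_assoc (x y z : Option Int) : omax (omax x y) z = omax x (omax y z) := by
  cases x <;> cases y <;> cases z <;> simp [omax] <;> split_ifs <;> first | rfl | omega

lemma listMax_append (xs ys : List Int) :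
    listMax (xs ++ ys) = omax (listMax xs) (listMax ys) := by
  induction xs with
  | nil => simp [listMax, omax]
  | cons a xs ih => simp [listMax, List.foldr] at *; rw [ih, omax_assoc]

lemma WF_tmax {t : STree} (h : WF t) : tmax t = listMax (alive t) := by
  induction t with
  | leaf v => cases v <;> simp [tmax, alive, listMax, omax]
  | node mx l r ihl ihr =>
    obtain ⟨hmx, hl, hr⟩ := h
    show mx = listMax (alive l ++ alive r)
    rw [hmx, listMax_append, ihl hl, ihr hr]

lemma ogt_omax (x y : Option Int) (i : Int) :
    ogt (omax x y) i = (ogt x i || ogt y i) := by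
  cases x <;> cases y <;> simp [omax, ogt] <;> split_ifs <;> simp <;> omega

lemma ogt_listMax (xs : List Int) (i : Int) :
    ogt (listMax xs) i = xs.any (fun v => decide (v > i)) := by
  induction xs with
  | nil => simp [listMax, ogt]
  | cons a xs ih =>
    have : listMax (a :: xs) = omax (some a) (listMax xs) := rfl
    rw [this, ogt_omax, ih]; simp [ogt]

lemma qr_eq_none {t : STree} (hwf : WF t) (i : Int) :
    qr t i = none ↔ ogt (tmax t) i = false := by
  induction t with
  | leaf v =>
    by_cases h : ogt (tmax (STree.leaf v)) i = true
    · simp [qr, h]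
    · simp at h; simp [qr, h]
  | node mx l r ihl ihr =>
    obtain ⟨hmx, hl, hr⟩ := hwf
    by_cases hg : ogt (tmax (STree.node mx l r)) i = true
    · have hsum : (ogt (tmax l) i || ogt (tmax r) i) = true := by
        simpa [tmax, hmx, ogt_omax] using hg
      have hne : qr (STree.node mx l r) i ≠ none := by
        rcases Bool.or_eq_true_iff.mp hsum with hL | hR
        · have hlne : qr l i ≠ none := by
            intro hc; rw [(ihl hl).mp hc] at hL; exact Bool.false_ne_true hL
          obtain ⟨l2, hql⟩ := Option.ne_none_iff_exists'.mp hlne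
          simp [qr, hg, hql]
        · cases hql : qr l i with
          | some l2 => simp [qr, hg, hql]
          | none =>
            have hrne : qr r i ≠ none := by
              intro hc; rw [(ihr hr).mp hc] at hR; exact Bool.false_ne_true hR
            obtain ⟨r2, hqr⟩ := Option.ne_none_iff_exists'.mp hrne
            simp [qr, hg, hql, hqr]
      simp [hne, hg]
    · simp at hg
      simp [qr, hg]

lemma mem_head_filter {p : Int → Bool} {xs : List Int} {h : Int} {rest : List Int}
    (hf : xs.filter p = h :: rest) : p h = true := by
  have : h ∈ xs.filter p := by rw [hf]; exact List.mem_cons_self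
  exact (List.mem_filter.mp this).2

lemma remove_head_filter {p : Int → Bool} {xs : List Int} {h : Int} {rest : List Int}
    (hf : xs.filter p = h :: rest) :
    PySem.List.remove? xs h = some (xs.eraseP p) := by
  induction xs generalizing rest with
  | nil => simp [List.filter] at hf
  | cons a tl ih =>
    by_cases hpa : p a = true
    · have : a = h := by simpa [List.filter, hpa] using congrArg (·.headD 0) hf
      subst this
      simp [PySem.List.remove?_cons_self, List.eraseP_cons_of_pos hpa]
    · simp at hpa
      have hf' : tl.filter p = h :: rest := by simpa [List.filter_cons, hpa] using hf
      have hne : a ≠ h := fun he => by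
        have := mem_head_filter hf'; rw [← he] at this; simp [hpa] at this
      rw [List.eraseP_cons_of_neg (by simp [hpa]),
        PySem.List.remove?_cons_of_ne tl hne, ih hf']
      rfl

lemma qr_eq_some {t : STree} (hwf : WF t) {i : Int} {t2 : STree}
    (h : qr t i = some t2) :
    WF t2 ∧ alive t2 = (alive t).eraseP (fun v => decide (v > i)) := by
  induction t generalizing t2 with
  | leaf v =>
    by_cases hg : ogt (tmax (.leaf v)) i = true
    · cases v with
      | none => simp [tmax, ogt] at hg
      | some a =>
        have ha : a > i := by simpa [tmax, ogt] using hg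
        have ht2 : t2 = .leaf none := by simpa [qr, hg] using h.symm
        subst ht2
        simp [WF, alive, ha]
    · simp at hg; simp [qr, hg] at h
  | node mx l r ihl ihr =>
    by_cases hg : ogt (tmax (STree.node mx l r)) i = true
    · obtain ⟨hmx, hl, hr⟩ := hwf
      cases hql : qr l i with
      | some l2 =>
        have ht2 : t2 = .node (omax (tmax l2) (tmax r)) l2 r := by
          simpa [qr, hg, hql] using h.symm
        subst ht2
        obtain ⟨hwl2, hal2⟩ := ihl hl hql
        have hexL : ∃ v ∈ alive l, (fun v => decide (v > i)) v = true := by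
          have : ogt (tmax l) i = true := by
            by_contra hc
            simp at hc
            exact absurd ((qr_eq_none hl i).mpr hc) (by simp [hql])
          rw [WF_tmax hl, ogt_listMax] at this
          simpa [List.any_eq_true] using this
        obtain ⟨v, hv, hpv⟩ := hexL
        refine ⟨⟨rfl, hwl2, hr⟩, ?_⟩
        show alive l2 ++ alive r = (alive l ++ alive r).eraseP (fun v => decide (v > i))
        rw [hal2]
        exact (List.eraseP_append_left (p := fun v => decide (v > i)) hpv (alive r) hv).symm
      | none =>
        cases hqr : qr r i with
        | some r2 =>
          have ht2 : t2 = .node (omax (tmax l) (tmax r2)) l r2 := by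
            simpa [qr, hg, hql, hqr] using h.symm
          subst ht2
          obtain ⟨hwr2, har2⟩ := ihr hr hqr
          have hnoL : ∀ v ∈ alive l, ¬ ((fun v => decide (v > i)) v = true) := by
            have : ogt (tmax l) i = false := (qr_eq_none hl i).mp hql
            rw [WF_tmax hl, ogt_listMax] at this
            intro v hv
            simpa using (List.any_eq_false.mp this) v hv
          refine ⟨⟨rfl, hl, hwr2⟩, ?_⟩
          show alive l ++ alive r2 = (alive l ++ alive r).eraseP (fun v => decide (v > i))
          rw [har2]
          exact (List.eraseP_append_right (alive r) hnoL).symm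
        | none => simp [qr, hg, hql, hqr] at h
    · simp at hg; simp [qr, hg] at h

lemma filter_empty_iff_qr_none {t : STree} (hwf : WF t) (i : Int) :
    ((alive t).filter (fun j => decide (j > i)) = [] ↔ qr t i = none) := by
  rw [qr_eq_none hwf, WF_tmax hwf, ogt_listMax]
  simp [List.filter_eq_nil_iff, List.any_eq_false]

lemma loop_eq (g : List Int) :
    ∀ (t : STree) (cnt : Int), WF t →
      (g.foldl stepA (alive t, cnt)).2 = (g.foldl stepB (t, cnt)).2 := by
  induction g with
  | nil => intro t cnt _; rfl
  | cons i g ih =>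
    intro t cnt hwf
    simp only [List.foldl_cons]
    cases hql : qr t i with
    | none =>
      have hfe : (alive t).filter (fun j => decide (j > i)) = [] :=
        (filter_empty_iff_qr_none hwf i).mpr hql
      rw [show stepA (alive t, cnt) i = (alive t, cnt + 1) by simp [stepA, hfe],
        show stepB (t, cnt) i = (t, cnt + 1) by simp [stepB, hql]]
      exact ih t (cnt + 1) hwf
    | some t2 =>
      obtain ⟨hwf2, hal2⟩ := qr_eq_some hwf hql
      have hfne : (alive t).filter (fun j => decide (j > i)) ≠ [] := by
        intro hc
        exact absurd ((filter_empty_iff_qr_none hwf i).mp hc) (by simp [hql])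
      obtain ⟨h, rest, hf⟩ := List.exists_cons_of_ne_nil hfne
      rw [show stepA (alive t, cnt) i = (alive t2, cnt) by
          simp [stepA, hf, remove_head_filter hf, hal2],
        show stepB (t, cnt) i = (t2, cnt) by simp [stepB, hql]]
      exact ih t2 cnt hwf2

lemma buildT_spec (xs : List Int) : WF (buildT xs) ∧ alive (buildT xs) = xs := by
  induction xs using buildT.induct with
  | case1 => simp [buildT, WF, alive]
  | case2 v => simp [buildT, WF, alive]
  | case3 a c rest m ihl ihr =>
    rw [buildT]
    refine ⟨⟨rfl, ihl.1, ihr.1⟩, ?_⟩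
    show alive _ ++ alive _ = a :: c :: rest
    rw [ihl.2, ihr.2, List.take_append_drop]

-- ===== VERDICT (by name: the statement is the Claim_ definition above) =====
theorem play_war_spec : Claim_equal_play_war := by
  intro g b _
  unfold Spec_play_war play_war play_war_alt
  obtain ⟨hwf, hal⟩ := buildT_spec b
  calc (g.foldl stepA (b, 0)).2
      = (g.foldl stepA (alive (buildT b), 0)).2 := by rw [hal]
    _ = (g.foldl stepB (buildT b, 0)).2 := loop_eq g (buildT b) 0 hwf
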